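-- pv_equiv track=rewrite | github.com/demisto/content | Packs/mnemonicMDR/Integrations/ArgusManagedDefence/ArgusManagedDefence.py | build_argus_priority_from_min_severity
-- ===== SOURCE A (Python) =====
-- from typing import Any, Dict, List, Union
--
-- ARGUS_PRIORITY_MAPPING = {"low": 1, "medium": 2, "high": 3, "critical": 4}
--
-- def argus_priority_to_demisto_severity(priority: str) -> int:
--     return ARGUS_PRIORITY_MAPPING.get(priority, 0)
--
-- def build_argus_priority_from_min_severity(min_severity: str) -> List[str]:
--     severities = ["low", "medium", "high", "critical"]
--     min_severity_list = []
--     for severity in severities: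
--         if argus_priority_to_demisto_severity(
--             min_severity.lower()
--         ) <= argus_priority_to_demisto_severity(severity):
--             min_severity_list.append(severity)
--     return min_severity_list
-- ===== SOURCE B (Python) =====
-- ARGUS_PRIORITY_MAPPING = {"low": 1, "medium": 2, "high": 3, "critical": 4}
--
--
-- def argus_priority_to_demisto_severity(priority: str) -> int:
--     return ARGUS_PRIORITY_MAPPING.get(priority, 0)
--
--
-- def build_argus_priority_from_min_severity(min_severity):
--     # The severities list is ordered by priority (index + 1), so the kept
--     # elements form a contiguous suffix: slice from the threshold directly.
--     severities = ["low", "medium", "high", "critical"]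
--     t = argus_priority_to_demisto_severity(min_severity.lower())
--     return severities[max(0, t - 1):]
-- ===== Notes on version B (the rewrite author's own statement) =====
-- stated objective: simpler
-- what changed: Replaces the per-element loop with repeated dict lookups and appends by one threshold lookup and a single list slice over the priority-ordered severities list.
import Mathlib
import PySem

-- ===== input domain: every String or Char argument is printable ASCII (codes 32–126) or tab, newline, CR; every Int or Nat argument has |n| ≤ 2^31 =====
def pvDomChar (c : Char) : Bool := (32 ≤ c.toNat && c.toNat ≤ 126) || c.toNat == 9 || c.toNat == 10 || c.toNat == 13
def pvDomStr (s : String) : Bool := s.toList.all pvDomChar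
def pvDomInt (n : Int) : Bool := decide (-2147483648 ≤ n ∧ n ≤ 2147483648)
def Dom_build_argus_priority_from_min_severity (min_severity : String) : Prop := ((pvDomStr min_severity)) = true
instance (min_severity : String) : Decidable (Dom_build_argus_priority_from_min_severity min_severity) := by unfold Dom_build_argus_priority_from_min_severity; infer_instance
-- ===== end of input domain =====

-- B replaces A's per-element loop (two dict lookups per severity) by a single
-- threshold lookup and one slice of the priority-ordered severities list (simpler).


-- ===== PORT A =====
def ARGUS_PRIORITY_MAPPING : PySem.Dict String Int :=
  PySem.Dict.ofList [("low", 1), ("medium", 2), ("high", 3), ("critical", 4)]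

def argus_priority_to_demisto_severity (priority : String) : Int :=
  ARGUS_PRIORITY_MAPPING.getD priority 0

def build_argus_priority_from_min_severity (min_severity : String) : List String :=
  let severities := ["low", "medium", "high", "critical"]
  severities.foldl (fun min_severity_list severity =>
    if argus_priority_to_demisto_severity (PySem.Str.lower min_severity)
        ≤ argus_priority_to_demisto_severity severity
    then min_severity_list ++ [severity] else min_severity_list) []

-- ===== PORT B =====
def build_argus_priority_from_min_severity_alt (min_severity : String) : List String :=
  let severities := ["low", "medium", "high", "critical"]
  let t := argus_priority_to_demisto_severity (PySem.Str.lower min_severity)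
  PySem.List.slice severities (some (max 0 (t - 1))) none

-- ===== PRECONDITION & SPEC =====
def Spec_build_argus_priority_from_min_severity (min_severity : String) (out : List String) : Prop := out = build_argus_priority_from_min_severity_alt min_severity
instance (min_severity : String) (out : List String) : Decidable (Spec_build_argus_priority_from_min_severity min_severity out) := by unfold Spec_build_argus_priority_from_min_severity; infer_instance

-- ===== CLAIM (what is proved, stated in full; the proofs are below) =====
def Claim_equal_build_argus_priority_from_min_severity : Prop := ∀ (min_severity : String), Dom_build_argus_priority_from_min_severity min_severity → Spec_build_argus_priority_from_min_severity min_severity (build_argus_priority_from_min_severity min_severity)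

-- ===== LEMMAS AND PROOFS =====

-- the map assigns every key one of the values 0..4
lemma argus_priority_cases (k : String) :
    argus_priority_to_demisto_severity k = 0 ∨ argus_priority_to_demisto_severity k = 1 ∨
    argus_priority_to_demisto_severity k = 2 ∨ argus_priority_to_demisto_severity k = 3 ∨
    argus_priority_to_demisto_severity k = 4 := by
  unfold argus_priority_to_demisto_severity ARGUS_PRIORITY_MAPPING
  simp [PySem.Dict.getD, PySem.Dict.ofList, PySem.Dict.empty, PySem.Dict.update,
        PySem.Dict.insert, PySem.Dict.get?]
  simp [List.find?]
  cases h1 : ("low" == k) <;> cases h2 : ("medium" == k) <;>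
    cases h3 : ("high" == k) <;> cases h4 : ("critical" == k) <;> simp_all

-- ===== VERDICT (by name: the statement is the Claim_ definition above) =====
theorem build_argus_priority_from_min_severity_spec : Claim_equal_build_argus_priority_from_min_severity := by
  intro s _
  unfold Spec_build_argus_priority_from_min_severity
  rcases argus_priority_cases (PySem.Str.lower s) with h|h|h|h|h <;>
    simp only [build_argus_priority_from_min_severity,
               build_argus_priority_from_min_severity_alt, h] <;> decide
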